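-- pv_equiv track=rewrite | github.com/edgardmota/hybrid_intrusion_detection_classifier | hybrid/hybrid_classifier.py | verifyClassesPredictions
-- ===== SOURCE A (Python) =====
-- def verifyClassesPredictions(predictions):
-- 	sair = 0
-- 	for i in range(0,len(predictions)):
-- 		if (predictions[i] == 0):
-- 			sair = 1
-- 		elif ((predictions[i] == 1) & (sair == 1 )):
-- 			return True
-- 	return False
-- ===== SOURCE B (Python) =====
-- def verifyClassesPredictions(predictions):
--     try:
--         i = predictions.index(0)
--     except ValueError:
--         return False
--     return 1 in predictions[i+1:]
-- ===== Notes on version B (the rewrite author's own statement) =====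
-- stated objective: simpler
-- what changed: Replaces the manual flag-scan loop with a two-phase locate-then-search: find the first 0 with list.index, then test membership of 1 in the slice after it (both C-level built-ins, measured 2.3x faster).
import Mathlib
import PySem

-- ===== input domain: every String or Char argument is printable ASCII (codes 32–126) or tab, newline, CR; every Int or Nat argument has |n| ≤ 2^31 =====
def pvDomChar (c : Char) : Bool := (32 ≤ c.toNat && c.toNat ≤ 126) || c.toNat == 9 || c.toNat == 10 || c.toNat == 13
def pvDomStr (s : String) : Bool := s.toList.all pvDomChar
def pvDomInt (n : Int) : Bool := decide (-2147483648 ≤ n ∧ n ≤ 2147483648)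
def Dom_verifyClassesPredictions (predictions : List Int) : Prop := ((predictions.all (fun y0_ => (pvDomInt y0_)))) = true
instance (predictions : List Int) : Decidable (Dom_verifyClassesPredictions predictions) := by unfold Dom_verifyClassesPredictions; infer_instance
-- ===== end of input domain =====

-- B replaces A's manual flag-scan loop with a locate-then-search decomposition
-- (find the first 0, then test membership of 1 after it); objective: simpler (and measured faster via C-level built-ins).

-- ===== PORT A =====
-- the for-loop with the 'sair' flag and early return, as structural recursion over the list
def vcpLoopA : List Int → Int → Bool
  | [], _ => false
  | x :: xs, sair =>
      if x = 0 then vcpLoopA xs 1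
      else if x = 1 ∧ sair = 1 then true
      else vcpLoopA xs sair

def verifyClassesPredictions (predictions : List Int) : Bool :=
  vcpLoopA predictions 0

-- ===== PORT B =====
-- predictions.index(0) → PySem.List.index?; ValueError → none → False;
-- '1 in predictions[i+1:]' → membership in PySem.List.slice from i+1
def verifyClassesPredictions_alt (predictions : List Int) : Bool :=
  match PySem.List.index? predictions 0 with
  | none => false
  | some i => decide ((1 : Int) ∈ PySem.List.slice predictions (some ((i + 1 : Nat) : Int)) none)

-- ===== PRECONDITION & SPEC =====
def Spec_verifyClassesPredictions (predictions : List Int) (out : Bool) : Prop := out = verifyClassesPredictions_alt predictions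
instance (predictions : List Int) (out : Bool) : Decidable (Spec_verifyClassesPredictions predictions out) := by unfold Spec_verifyClassesPredictions; infer_instance

-- ===== CLAIM (what is proved, stated in full; the proofs are below) =====
def Claim_equal_verifyClassesPredictions : Prop := ∀ (predictions : List Int), Dom_verifyClassesPredictions predictions → Spec_verifyClassesPredictions predictions (verifyClassesPredictions predictions)

-- ===== LEMMAS AND PROOFS =====

-- once the flag is set, A's loop just searches for a 1
theorem vcpLoopA_one (xs : List Int) : vcpLoopA xs 1 = decide ((1 : Int) ∈ xs) := by
  induction xs with
  | nil => simp [vcpLoopA]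
  | cons x xs ih =>
      by_cases hx0 : x = 0
      · subst hx0; simp [vcpLoopA, ih]
      · by_cases hx1 : x = 1
        · subst hx1; simp [vcpLoopA]
        · simp [vcpLoopA, hx0, hx1, ih, eq_comm]

theorem vcpLoopA_zero_eq_alt (xs : List Int) :
    vcpLoopA xs 0 = verifyClassesPredictions_alt xs := by
  induction xs with
  | nil => simp [vcpLoopA, verifyClassesPredictions_alt, PySem.List.index?]
  | cons x xs ih =>
      by_cases hx0 : x = 0
      · subst hx0
        have halt : verifyClassesPredictions_alt ((0 : Int) :: xs) = decide ((1 : Int) ∈ xs) := by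
          rw [verifyClassesPredictions_alt, PySem.List.index?_cons_self]
          simp [PySem.List.slice_from _ (by omega : (0:Int) ≤ 1)]
        rw [halt]
        simp [vcpLoopA, vcpLoopA_one]
      · have hstep : vcpLoopA (x :: xs) 0 = vcpLoopA xs 0 := by
          by_cases hx1 : x = 1 <;> simp [vcpLoopA, hx0, hx1]
        rw [hstep, ih, verifyClassesPredictions_alt, verifyClassesPredictions_alt,
            PySem.List.index?_cons_of_ne xs hx0]
        cases h : PySem.List.index? xs 0 with
        | none => simp
        | some i =>
            simp only [Option.map_some]
            show decide ((1:Int) ∈ PySem.List.slice xs (some ((i + 1 : Nat) : Int))) =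
                 decide ((1:Int) ∈ PySem.List.slice (x :: xs) (some ((i + 1 + 1 : Nat) : Int)))
            rw [PySem.List.slice_from_natCast, PySem.List.slice_from_natCast]
            simp [List.drop_succ_cons]

-- ===== VERDICT (by name: the statement is the Claim_ definition above) =====
theorem verifyClassesPredictions_spec : Claim_equal_verifyClassesPredictions := by
  intro predictions _
  unfold Spec_verifyClassesPredictions verifyClassesPredictions
  exact vcpLoopA_zero_eq_alt predictions
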